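-- pv_equiv track=rewrite | github.com/Vineshnayak/HygieneVision | hygiene_engine.py | _find_class_index
-- ===== SOURCE A (Python) =====
-- def _find_class_index(names, target_variants=("hair_cap", "hair cap", "cap", "haircap", "hair-cap")):
--     if names is None:
--         return None
--     for i, name in enumerate(names.values() if isinstance(names, dict) else names):
--         n = str(name).lower().strip()
--         if n in target_variants or n.replace(" ", "_") in target_variants:
--             return i
--     for i, name in enumerate(names.values() if isinstance(names, dict) else names):
--         n = str(name).lower()
--         if "hair" in n and "cap" in n:
--             return i
--     return None
-- ===== SOURCE B (Python) =====
-- def _find_class_index(names, target_variants=("hair_cap", "hair cap", "cap", "haircap", "hair-cap")):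
--     if names is None:
--         return None
--     fallback = None
--     for i, name in enumerate(names.values() if isinstance(names, dict) else names):
--         n_strip = str(name).lower().strip()
--         if n_strip in target_variants or n_strip.replace(" ", "_") in target_variants:
--             return i
--         if fallback is None:
--             n = str(name).lower()
--             if "hair" in n and "cap" in n:
--                 fallback = i
--     return fallback
-- ===== Notes on version B (the rewrite author's own statement) =====
-- stated objective: simpler
-- what changed: Replaced A's two sequential enumerate loops (exact-variant pass, then fuzzy hair+cap pass) by a single pass that returns on an exact match and keeps the first fuzzy match index in a fallback variable returned after the loop.
import Mathlib
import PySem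

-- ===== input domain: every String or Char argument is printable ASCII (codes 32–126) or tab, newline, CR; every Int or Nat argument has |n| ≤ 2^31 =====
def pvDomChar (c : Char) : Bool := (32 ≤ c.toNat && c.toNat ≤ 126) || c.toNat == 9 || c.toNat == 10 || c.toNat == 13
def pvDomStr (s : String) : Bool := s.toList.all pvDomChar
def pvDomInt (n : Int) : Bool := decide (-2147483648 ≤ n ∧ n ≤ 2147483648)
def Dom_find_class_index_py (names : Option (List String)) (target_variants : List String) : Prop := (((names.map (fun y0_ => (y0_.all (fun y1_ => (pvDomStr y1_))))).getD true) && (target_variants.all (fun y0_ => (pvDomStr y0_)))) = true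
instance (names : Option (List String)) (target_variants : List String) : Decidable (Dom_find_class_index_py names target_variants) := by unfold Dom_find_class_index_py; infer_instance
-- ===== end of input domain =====

-- B replaces A's two sequential passes (exact-variant, then fuzzy hair+cap) by one pass keeping a fallback index: simpler single traversal, same return value.
-- ===== PORT A =====
def fcA_exact (tv : List String) (s : String) : Bool :=
  tv.contains (PySem.Str.strip (PySem.Str.lower s)) ||
  tv.contains (PySem.Str.replace (PySem.Str.strip (PySem.Str.lower s)) " " "_")

def fcA_fuzzy (s : String) : Bool :=
  PySem.Str.isIn "hair" (PySem.Str.lower s) && PySem.Str.isIn "cap" (PySem.Str.lower s)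

-- first for-loop of A: first index whose stripped lowercase form is an exact variant
def fcA_loop1 (tv : List String) : List String → Int → Option Int
  | [], _ => none
  | x :: xs, i => if fcA_exact tv x then some i else fcA_loop1 tv xs (i + 1)

-- second for-loop of A: first index whose lowercase form contains "hair" and "cap"
def fcA_loop2 : List String → Int → Option Int
  | [], _ => none
  | x :: xs, i => if fcA_fuzzy x then some i else fcA_loop2 xs (i + 1)

def find_class_index_py (names : Option (List String)) (target_variants : List String) : Option Int :=
  match names with
  | none => none
  | some xs =>
    match fcA_loop1 target_variants xs 0 with
    | some i => some i
    | none => fcA_loop2 xs 0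

-- ===== PORT B =====
-- single pass: return immediately on an exact variant match, keep the first fuzzy match index in fb
def fcB_loop (tv : List String) : List String → Int → Option Int → Option Int
  | [], _, fb => fb
  | x :: xs, i, fb =>
    if tv.contains (PySem.Str.strip (PySem.Str.lower x)) ||
       tv.contains (PySem.Str.replace (PySem.Str.strip (PySem.Str.lower x)) " " "_") then
      some i
    else
      fcB_loop tv xs (i + 1)
        (match fb with
         | some j => some j
         | none =>
           if PySem.Str.isIn "hair" (PySem.Str.lower x) && PySem.Str.isIn "cap" (PySem.Str.lower x) then
             some i
           else none)

def find_class_index_py_alt (names : Option (List String)) (target_variants : List String) : Option Int :=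
  match names with
  | none => none
  | some xs => fcB_loop target_variants xs 0 none

-- ===== PRECONDITION & SPEC =====
def Spec_find_class_index_py (names : Option (List String)) (target_variants : List String) (out : Option Int) : Prop := out = find_class_index_py_alt names target_variants
instance (names : Option (List String)) (target_variants : List String) (out : Option Int) : Decidable (Spec_find_class_index_py names target_variants out) := by unfold Spec_find_class_index_py; infer_instance

-- ===== CLAIM (what is proved, stated in full; the proofs are below) =====
def Claim_equal_find_class_index_py : Prop := ∀ (names : Option (List String)) (target_variants : List String), Dom_find_class_index_py names target_variants → Spec_find_class_index_py names target_variants (find_class_index_py names target_variants)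

-- ===== LEMMAS AND PROOFS =====
-- loop invariant: B's single pass equals A's first loop, then the fallback, then A's second loop
theorem fcB_loop_eq (tv : List String) (xs : List String) (i : Int) (fb : Option Int) :
    fcB_loop tv xs i fb =
      match fcA_loop1 tv xs i with
      | some j => some j
      | none => match fb with
        | some j => some j
        | none => fcA_loop2 xs i := by
  induction xs generalizing i fb with
  | nil => cases fb <;> rfl
  | cons x xs ih =>
    simp only [fcB_loop, fcA_loop1, fcA_loop2]
    by_cases hx : fcA_exact tv x = true
    · rw [if_pos hx]
      unfold fcA_exact at hx
      rw [if_pos hx]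
    · rw [if_neg hx]
      have hx' := hx; unfold fcA_exact at hx'
      rw [if_neg hx', ih]
      cases fb with
      | some j => cases fcA_loop1 tv xs (i + 1) <;> rfl
      | none =>
        by_cases hf : fcA_fuzzy x = true
        · have hf' := hf; unfold fcA_fuzzy at hf'
          rw [if_pos hf', if_pos hf]
        · have hf' := hf; unfold fcA_fuzzy at hf'
          rw [if_neg hf', if_neg hf]

-- ===== VERDICT (by name: the statement is the Claim_ definition above) =====
theorem find_class_index_py_spec : Claim_equal_find_class_index_py := by
  intro names tv _
  unfold Spec_find_class_index_py
  cases names with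
  | none => rfl
  | some xs =>
    show (match fcA_loop1 tv xs 0 with
          | some i => some i
          | none => fcA_loop2 xs 0) = fcB_loop tv xs 0 none
    rw [fcB_loop_eq]
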